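-- pv_equiv track=rewrite | github.com/ABradwell/Portfolio | Python/Basic_Abilities/Arrays, Lists, and Selection sort/Occurances in Array.py | account
-- ===== SOURCE A (Python) =====
-- def account(M, v):
--       NP = 0
--       count = 0
--       breakout = False
--       for w in M:
--             for i in w:
--                   NP = NP + 1
--                   if i== v:
--                         count = count + 1
--       return(count, NP)
-- ===== SOURCE B (Python) =====
-- def account(M, v):
--     flat = [i for w in M for i in w]
--     freq = {}
--     for i in flat:
--         freq[i] = freq.get(i, 0) + 1
--     return (freq.get(v, 0), len(flat))
-- ===== Notes on version B (the rewrite author's own statement) =====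
-- stated objective: alternative
-- what changed: Instead of a fused nested loop carrying two counters, B flattens the matrix once, builds a frequency histogram (dict) of all elements, and answers by a single dict lookup for the matches plus the flattened list's length for the total.
import Mathlib
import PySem

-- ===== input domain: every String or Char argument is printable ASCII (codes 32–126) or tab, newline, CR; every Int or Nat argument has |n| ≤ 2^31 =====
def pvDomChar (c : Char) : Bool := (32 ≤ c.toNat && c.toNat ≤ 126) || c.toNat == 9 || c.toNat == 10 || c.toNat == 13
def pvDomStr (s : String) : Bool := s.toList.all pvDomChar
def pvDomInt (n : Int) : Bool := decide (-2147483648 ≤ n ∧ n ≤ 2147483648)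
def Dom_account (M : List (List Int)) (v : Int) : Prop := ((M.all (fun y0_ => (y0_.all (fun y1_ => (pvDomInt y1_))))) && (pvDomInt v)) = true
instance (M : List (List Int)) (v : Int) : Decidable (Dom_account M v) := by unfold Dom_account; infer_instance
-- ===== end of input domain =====

-- B flattens the matrix once, builds a frequency histogram (dict) of the elements, and answers by one lookup plus the flattened length; alternative data structure, same cost.
-- ===== PORT A =====
-- fused nested loop over rows and elements, carrying the counters (NP, count)
def account (M : List (List Int)) (v : Int) : Int × Int :=
  let st := M.foldl (fun (st : Int × Int) w =>
    w.foldl (fun (st : Int × Int) i =>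
      let np := st.1 + 1
      let c := if i == v then st.2 + 1 else st.2
      (np, c)) st) (0, 0)
  (st.2, st.1)

-- ===== PORT B =====
-- flatten, build a histogram dict, answer by lookup and length
def account_alt (M : List (List Int)) (v : Int) : Int × Int :=
  let flat := M.flatMap (fun w => w)
  let freq := flat.foldl (fun (d : PySem.Dict Int Int) i => d.insert i (d.getD i 0 + 1)) PySem.Dict.empty
  (freq.getD v 0, (flat.length : Int))

-- ===== PRECONDITION & SPEC =====
def Spec_account (M : List (List Int)) (v : Int) (out : Int × Int) : Prop := out = account_alt M v
instance (M : List (List Int)) (v : Int) (out : Int × Int) : Decidable (Spec_account M v out) := by unfold Spec_account; infer_instance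

-- ===== CLAIM =====
def Claim_equal_account : Prop := ∀ (M : List (List Int)) (v : Int), Dom_account M v → Spec_account M v (account M v)

-- ===== LEMMAS AND PROOFS =====
-- inner loop of A: one row adds (length, count of v) to the carried state
theorem account_inner (w : List Int) (v : Int) (st : Int × Int) :
    w.foldl (fun (st : Int × Int) i =>
      let np := st.1 + 1
      let c := if i == v then st.2 + 1 else st.2
      (np, c)) st = (st.1 + (w.length : Int), st.2 + (w.count v : Int)) := by
  induction w generalizing st with
  | nil => simp
  | cons a t ih =>
    rw [List.foldl_cons, ih]
    by_cases h : a = v <;>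
      simp [h, Prod.ext_iff] <;> omega

-- outer loop of A: the two counters end as (total length, total count) over the flattening
theorem account_outer (M : List (List Int)) (v : Int) (st : Int × Int) :
    M.foldl (fun (st : Int × Int) w =>
      w.foldl (fun (st : Int × Int) i =>
        let np := st.1 + 1
        let c := if i == v then st.2 + 1 else st.2
        (np, c)) st) st
    = (st.1 + ((M.flatMap (fun w => w)).length : Int),
       st.2 + ((M.flatMap (fun w => w)).count v : Int)) := by
  induction M generalizing st with
  | nil => simp
  | cons w t ih =>
    rw [List.foldl_cons, account_inner, ih]
    simp [Prod.ext_iff, List.count_append]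
    constructor <;> ring

-- ===== VERDICT =====
theorem account_spec : Claim_equal_account := by
  intro M v _
  unfold Spec_account account account_alt
  simp only [account_outer, PySem.Dict.getD_foldl_insert_add_one]
  simp
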